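-- pv_equiv track=rewrite | github.com/BrChung/Lexical-Analysis | main.py | splitOperators
-- ===== SOURCE A (Python) =====
-- def splitOperators(inputLine):
--     #Add whitespace char at end of string in case last element in a operator
--     leftToParseString = inputLine + ' '     #String that has not yet parsed
--     parsedString = ''                       #String that is already parsed
--     while(len(leftToParseString) != 0):
--         #If first two elements of string left ot parse is a 2 char operator
--         if(leftToParseString[:2] == "++" or leftToParseString[:2] == "--"
--             or leftToParseString[:2] == "<=" or leftToParseString[:2] == ">="
--             or leftToParseString[:2] == "==" or leftToParseString[:2] == "!="):
--             parsedString = parsedString + ' ' + leftToParseString[:2] + ' '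
--             tempString = leftToParseString[2:]
--             leftToParseString = tempString
--         #If next char in string is an operator/seperator
--         elif(leftToParseString[0] == "!" or leftToParseString[0] == "="
--         or leftToParseString[0] == "+" or leftToParseString[0] == "-"
--         or leftToParseString[0] == "*" or leftToParseString[0] == "/"
--         or leftToParseString[0] == "<" or leftToParseString[0] == ">"
--         or leftToParseString[0] == "(" or leftToParseString[0] == ")"
--         or leftToParseString[0] == "{" or leftToParseString[0] == "}"
--         or leftToParseString[0] == "[" or leftToParseString[0] == "]"
--         or leftToParseString[0] == ":" or leftToParseString[0] == ";"
--         or leftToParseString[0] == ","):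
--             parsedString = parsedString + ' ' + leftToParseString[0] + ' '
--             tempString = leftToParseString[1:]
--             leftToParseString = tempString
--         #Else shift next string
--         else:
--             parsedString = parsedString + leftToParseString[0]
--             leftToParseString = leftToParseString[1:]
--
--     return parsedString
-- ===== SOURCE B (Python) =====
-- import re
--
-- # Single regex pass: two-char operators first, then the single-char operator class;
-- # the regex engine's leftmost non-overlapping matching reproduces the scanner exactly.
-- _OP = re.compile(r'\+\+|--|<=|>=|==|!=|[!=+\-*/<>(){}\[\]:;,]')
--
--
-- def splitOperators(inputLine):
--     return _OP.sub(lambda m: ' ' + m.group(0) + ' ', inputLine + ' ')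
-- ===== Notes on version B (the rewrite author's own statement) =====
-- stated objective: faster
-- what changed: Replaces the manual while-loop that repeatedly slices the remaining string and concatenates onto the parsed string with a single compiled-regex substitution (two-char operators alternated before the single-char class), relying on re.sub's leftmost non-overlapping matching.
import Mathlib
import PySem

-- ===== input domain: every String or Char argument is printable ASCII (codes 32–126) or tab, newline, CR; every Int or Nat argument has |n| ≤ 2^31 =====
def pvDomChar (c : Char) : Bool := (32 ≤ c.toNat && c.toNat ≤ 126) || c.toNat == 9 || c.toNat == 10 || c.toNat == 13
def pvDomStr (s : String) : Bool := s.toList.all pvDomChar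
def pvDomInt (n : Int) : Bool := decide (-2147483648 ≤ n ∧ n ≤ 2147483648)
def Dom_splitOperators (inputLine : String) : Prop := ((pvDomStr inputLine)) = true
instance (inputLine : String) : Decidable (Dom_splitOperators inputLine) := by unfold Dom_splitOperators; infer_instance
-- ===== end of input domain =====

-- B replaces A's quadratic slice-and-concatenate while loop by a single regex substitution
-- (re.sub, two-char operators before the single-char class); same return value, simpler and faster.

-- ===== PORT A =====
-- A's while loop as recursion on leftToParseString; a Python slice s[:2]/s[2:]/s[1:] on the
-- char list is List.take/List.drop (exact: all slice bounds here are nonnegative).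
def splitOperatorsGo (leftToParseString parsedString : List Char) : List Char :=
  match leftToParseString with
  | [] => parsedString
  | c :: rest =>
    if (c :: rest).take 2 = ['+','+'] ∨ (c :: rest).take 2 = ['-','-'] ∨
       (c :: rest).take 2 = ['<','='] ∨ (c :: rest).take 2 = ['>','='] ∨
       (c :: rest).take 2 = ['=','='] ∨ (c :: rest).take 2 = ['!','='] then
      splitOperatorsGo ((c :: rest).drop 2) (parsedString ++ ' ' :: ((c :: rest).take 2 ++ [' ']))
    else if c = '!' ∨ c = '=' ∨ c = '+' ∨ c = '-' ∨ c = '*' ∨ c = '/' ∨ c = '<' ∨ c = '>' ∨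
            c = '(' ∨ c = ')' ∨ c = '{' ∨ c = '}' ∨ c = '[' ∨ c = ']' ∨ c = ':' ∨ c = ';' ∨
            c = ',' then
      splitOperatorsGo rest (parsedString ++ [' ', c, ' '])
    else
      splitOperatorsGo rest (parsedString ++ [c])
termination_by leftToParseString.length
decreasing_by all_goals simp

def splitOperators (inputLine : String) : String :=
  String.ofList (splitOperatorsGo (inputLine.toList ++ [' ']) [])

-- ===== PORT B =====
-- Hand port of Source B's re.sub with its FIXED pattern r'\+\+|--|<=|>=|==|!=|[!=+\-*/<>(){}\[\]:;,]'
-- (Lean has no regex engine): re.sub scans left to right, at each position tries the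
-- alternatives in pattern order (the six two-char operators, then the character class),
-- consumes a match (replacing m by ' '+m+' ') or copies one char; exact for this pattern.
def pvCharClass (c : Char) : Bool :=   -- the class [!=+\-*/<>(){}\[\]:;,]
  c == '!' || c == '=' || c == '+' || c == '-' || c == '*' || c == '/' || c == '<' || c == '>' ||
  c == '(' || c == ')' || c == '{' || c == '}' || c == '[' || c == ']' || c == ':' || c == ';' ||
  c == ','

def pvTwoCharAlt (c1 c2 : Char) : Bool :=   -- the alternatives \+\+|--|<=|>=|==|!=
  (c1 == '+' && c2 == '+') || (c1 == '-' && c2 == '-') || (c1 == '<' && c2 == '=') ||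
  (c1 == '>' && c2 == '=') || (c1 == '=' && c2 == '=') || (c1 == '!' && c2 == '=')

def pvSub : List Char → List Char
  | [] => []
  | [c] => if pvCharClass c then [' ', c, ' '] else [c]
  | c1 :: c2 :: rest =>
    if pvTwoCharAlt c1 c2 then ' ' :: c1 :: c2 :: ' ' :: pvSub rest
    else if pvCharClass c1 then ' ' :: c1 :: ' ' :: pvSub (c2 :: rest)
    else c1 :: pvSub (c2 :: rest)

def splitOperators_alt (inputLine : String) : String :=
  String.ofList (pvSub (inputLine.toList ++ [' ']))

-- ===== PRECONDITION & SPEC =====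
def Spec_splitOperators (inputLine : String) (out : String) : Prop := out = splitOperators_alt inputLine
instance (inputLine : String) (out : String) : Decidable (Spec_splitOperators inputLine out) := by unfold Spec_splitOperators; infer_instance

-- ===== CLAIM (what is proved, stated in full; the proofs are below) =====
def Claim_equal_splitOperators : Prop := ∀ (inputLine : String), Dom_splitOperators inputLine → Spec_splitOperators inputLine (splitOperators inputLine)

-- ===== LEMMAS AND PROOFS =====

lemma cond_single (c : Char) :
    (c = '!' ∨ c = '=' ∨ c = '+' ∨ c = '-' ∨ c = '*' ∨ c = '/' ∨ c = '<' ∨ c = '>' ∨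
     c = '(' ∨ c = ')' ∨ c = '{' ∨ c = '}' ∨ c = '[' ∨ c = ']' ∨ c = ':' ∨ c = ';' ∨
     c = ',') ↔ pvCharClass c = true := by
  simp only [pvCharClass, Bool.or_eq_true, beq_iff_eq]
  tauto

lemma cond_two (c1 c2 : Char) :
    ([c1, c2] = ['+','+'] ∨ [c1, c2] = ['-','-'] ∨ [c1, c2] = ['<','='] ∨
     [c1, c2] = ['>','='] ∨ [c1, c2] = ['=','='] ∨ [c1, c2] = ['!','=']) ↔
    pvTwoCharAlt c1 c2 = true := by
  simp only [pvTwoCharAlt, Bool.or_eq_true, Bool.and_eq_true, beq_iff_eq, List.cons.injEq,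
    and_true]
  tauto

lemma go_eq : ∀ (left parsed : List Char), splitOperatorsGo left parsed = parsed ++ pvSub left
  | [], parsed => by simp [splitOperatorsGo, pvSub]
  | [c], parsed => by
      rw [splitOperatorsGo]
      rw [if_neg (by simp)]
      simp only [cond_single c]
      by_cases h1 : pvCharClass c = true
      · rw [if_pos h1, go_eq []]
        simp [pvSub, h1]
      · rw [if_neg h1, go_eq []]
        simp [pvSub, h1]
  | c1 :: c2 :: rest, parsed => by
      rw [splitOperatorsGo]
      have ht : (c1 :: c2 :: rest).take 2 = [c1, c2] := rfl
      have hd : (c1 :: c2 :: rest).drop 2 = rest := rfl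
      simp only [ht, hd, cond_two c1 c2, cond_single c1]
      by_cases h2 : pvTwoCharAlt c1 c2 = true
      · rw [if_pos h2, go_eq rest]
        simp [pvSub, h2]
      · rw [if_neg h2]
        by_cases h1 : pvCharClass c1 = true
        · rw [if_pos h1, go_eq (c2 :: rest)]
          simp [pvSub, h2, h1]
        · rw [if_neg h1, go_eq (c2 :: rest)]
          simp [pvSub, h2, h1]
termination_by left _ => left.length

-- ===== VERDICT (by name: the statement is the Claim_ definition above) =====
theorem splitOperators_spec : Claim_equal_splitOperators := by
  intro inputLine _
  unfold Spec_splitOperators splitOperators splitOperators_alt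
  rw [go_eq]
  simp
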